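-- pv_equiv track=rewrite | github.com/RadkaValkova/SoftUni-Web-Developer | Programming Advanced Python/Multidimentional lists/03_primary_diagonal.py | get_sum_below_primary
-- ===== SOURCE A (Python) =====
-- def get_sum_below_primary(matrix):
--     sum_below = 0
--     for row_index in range(len(matrix)):
--         for column_index in range(len(matrix)):
--             current_el = matrix[row_index][column_index]
--             sum_below += current_el
--             if column_index <= row_index: # including diagonal
--             # if column_index < row_index: exluding diagonal
--                 sum_below += current_el
--     return sum_below
-- ===== SOURCE B (Python) =====
-- def get_sum_below_primary(matrix):
--     n = len(matrix)
--     full = sum(matrix[i][j] for i in range(n) for j in range(n))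
--     lower = sum(matrix[i][j] for i in range(n) for j in range(i + 1))
--     return full + lower
-- ===== Notes on version B (the rewrite author's own statement) =====
-- stated objective: simpler
-- what changed: Replaces the single interleaved loop with its column<=row branch by two separate branch-free comprehension sums (the full n-by-n sum plus the lower-triangle-including-diagonal sum) that are added at the end.
import Mathlib
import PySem

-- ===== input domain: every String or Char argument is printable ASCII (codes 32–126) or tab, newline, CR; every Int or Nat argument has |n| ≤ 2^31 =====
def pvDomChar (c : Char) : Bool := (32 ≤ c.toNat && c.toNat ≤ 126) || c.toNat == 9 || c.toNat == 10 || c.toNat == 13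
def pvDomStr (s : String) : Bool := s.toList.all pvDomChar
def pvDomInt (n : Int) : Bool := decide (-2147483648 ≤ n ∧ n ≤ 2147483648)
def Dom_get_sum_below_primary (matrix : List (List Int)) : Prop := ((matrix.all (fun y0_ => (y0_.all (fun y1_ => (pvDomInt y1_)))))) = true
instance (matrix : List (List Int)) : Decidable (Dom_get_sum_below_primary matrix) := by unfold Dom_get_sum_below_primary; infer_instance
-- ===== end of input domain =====

-- B replaces A's interleaved index loop (with its column<=row branch) by two separate
-- branch-free sums (full n-by-n sum plus lower-triangle sum); same O(n^2) cost, plainer code.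


-- ===== PORT A =====
def get_sum_below_primary (matrix : List (List Int)) : Int :=
  (PySem.List.pyRange 0 (matrix.length : Int) 1).foldl (fun sum_below row_index =>
    (PySem.List.pyRange 0 (matrix.length : Int) 1).foldl (fun sum_below column_index =>
      let current_el := PySem.List.pyGetD (PySem.List.pyGetD matrix row_index []) column_index 0
      let sum_below := sum_below + current_el
      if column_index ≤ row_index then sum_below + current_el else sum_below) sum_below) 0

-- ===== PORT B =====
def get_sum_below_primary_alt (matrix : List (List Int)) : Int :=
  let n : Int := (matrix.length : Int)
  let full := ((PySem.List.pyRange 0 n 1).map (fun i =>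
      ((PySem.List.pyRange 0 n 1).map (fun j =>
        PySem.List.pyGetD (PySem.List.pyGetD matrix i []) j 0)).sum)).sum
  let lower := ((PySem.List.pyRange 0 n 1).map (fun i =>
      ((PySem.List.pyRange 0 (i + 1) 1).map (fun j =>
        PySem.List.pyGetD (PySem.List.pyGetD matrix i []) j 0)).sum)).sum
  full + lower

-- ===== PRECONDITION & SPEC =====
-- Pre_ excludes exactly the inputs on which A raises IndexError: matrices with a row
-- shorter than len(matrix) (A indexes every row at columns 0..len(matrix)-1).
def Pre_get_sum_below_primary (matrix : List (List Int)) : Prop :=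
  (matrix.all (fun row => matrix.length ≤ row.length)) = true
instance (matrix : List (List Int)) : Decidable (Pre_get_sum_below_primary matrix) := by
  unfold Pre_get_sum_below_primary; infer_instance

def pvWitness_get_sum_below_primary : List (List Int) := [[1, 2], [3, 4]]

def Spec_get_sum_below_primary (matrix : List (List Int)) (out : Int) : Prop := out = get_sum_below_primary_alt matrix
instance (matrix : List (List Int)) (out : Int) : Decidable (Spec_get_sum_below_primary matrix out) := by unfold Spec_get_sum_below_primary; infer_instance

-- ===== CLAIM (what is proved, stated in full; the proofs are below) =====
def Claim_equal_get_sum_below_primary : Prop := ∀ (matrix : List (List Int)), Dom_get_sum_below_primary matrix → Pre_get_sum_below_primary matrix → Spec_get_sum_below_primary matrix (get_sum_below_primary matrix)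

-- ===== LEMMAS AND PROOFS =====

-- map of pyGetD over range(0,n) is the n-prefix of the row (when n fits in the row)
theorem map_pyGetD_range_take (row : List Int) (n : Int) (hn : 0 ≤ n)
    (h : n.toNat ≤ row.length) :
    (PySem.List.pyRange 0 n 1).map (fun ci => PySem.List.pyGetD row ci 0)
      = row.take n.toNat := by
  have hlen : (row.take n.toNat).length = n.toNat := by
    simp [List.length_take]; omega
  have := PySem.List.map_pyGetD_pyRange_zero (xs := row.take n.toNat) (d := 0)
  simp only [PySem.List.len_eq, hlen] at this
  rw [Int.toNat_of_nonneg hn] at this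
  rw [← this]
  apply List.map_congr_left
  intro ci hci
  rcases PySem.List.mem_pyRange_one.mp hci with ⟨h0, hlt⟩
  rw [PySem.List.pyGetD_of_nonneg _ _ h0, PySem.List.pyGetD_of_nonneg _ _ h0]
  have hci' : ci.toNat < n.toNat := by omega
  rw [List.getD_eq_getElem?_getD, List.getD_eq_getElem?_getD]
  rw [List.getElem?_take_of_lt hci']

-- the inner column loop adds sum(row[:n]) + sum(row[:r+1])
theorem inner_loop_eq (row : List Int) (n r s : Int) (hr0 : 0 ≤ r) (hrn : r < n)
    (hlen : n.toNat ≤ row.length) :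
    (PySem.List.pyRange 0 n 1).foldl (fun sum_below column_index =>
        let current_el := PySem.List.pyGetD row column_index 0
        let sum_below := sum_below + current_el
        if column_index ≤ r then sum_below + current_el else sum_below) s
      = s + (row.take n.toNat).sum + (row.take (r + 1).toNat).sum := by
  have hbody : ∀ (acc : Int), ∀ ci ∈ PySem.List.pyRange 0 n 1,
      (fun sum_below column_index =>
        let current_el := PySem.List.pyGetD row column_index 0
        let sum_below := sum_below + current_el
        if column_index ≤ r then sum_below + current_el else sum_below) acc ci
      = acc + (PySem.List.pyGetD row ci 0
          + (if ci ≤ r then PySem.List.pyGetD row ci 0 else 0)) := by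
    intro acc ci _
    by_cases h : ci ≤ r
    · simp [h]; ring
    · simp [h]
  rw [PySem.List.foldl_congr_mem _ _ _ _ hbody, PySem.List.foldl_add,
      PySem.List.sum_map_add_int, map_pyGetD_range_take row n (by omega) hlen]
  have hsplit := PySem.List.pyRange_one_append 0 (r + 1) n (by omega) (by omega)
  rw [hsplit, List.map_append, List.sum_append]
  have h1 : (PySem.List.pyRange 0 (r + 1) 1).map
      (fun ci => if ci ≤ r then PySem.List.pyGetD row ci 0 else 0)
      = (PySem.List.pyRange 0 (r + 1) 1).map (fun ci => PySem.List.pyGetD row ci 0) := by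
    apply List.map_congr_left
    intro ci hci
    rcases PySem.List.mem_pyRange_one.mp hci with ⟨h0, hlt⟩
    simp [show ci ≤ r by omega]
  have h2 : (PySem.List.pyRange (r + 1) n 1).map
      (fun ci => if ci ≤ r then PySem.List.pyGetD row ci 0 else 0)
      = (PySem.List.pyRange (r + 1) n 1).map (fun _ => (0 : Int)) := by
    apply List.map_congr_left
    intro ci hci
    rcases PySem.List.mem_pyRange_one.mp hci with ⟨h0, hlt⟩
    simp [show ¬ ci ≤ r by omega]
  rw [h1, h2, map_pyGetD_range_take row (r + 1) (by omega) (by omega)]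
  simp
  ring

-- ===== VERDICT (by name: the statement is the Claim_ definition above) =====
theorem get_sum_below_primary_spec : Claim_equal_get_sum_below_primary := by
  intro matrix _ hpre
  unfold Spec_get_sum_below_primary get_sum_below_primary get_sum_below_primary_alt
  dsimp only
  have hall : ∀ row ∈ matrix, matrix.length ≤ row.length := by
    simp only [Pre_get_sum_below_primary, List.all_eq_true, decide_eq_true_eq] at hpre
    exact hpre
  set n : Int := (matrix.length : Int) with hn
  -- rewrite A's outer loop via the inner-loop lemma
  have houter : ∀ (acc : Int), ∀ ri ∈ PySem.List.pyRange 0 n 1,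
      (fun sum_below row_index =>
        (PySem.List.pyRange 0 n 1).foldl (fun sum_below column_index =>
          let current_el := PySem.List.pyGetD (PySem.List.pyGetD matrix row_index []) column_index 0
          let sum_below := sum_below + current_el
          if column_index ≤ row_index then sum_below + current_el else sum_below) sum_below) acc ri
      = acc + (((PySem.List.pyGetD matrix ri []).take n.toNat).sum
          + ((PySem.List.pyGetD matrix ri []).take (ri + 1).toNat).sum) := by
    intro acc ri hri
    rcases PySem.List.mem_pyRange_one.mp hri with ⟨h0, hlt⟩
    have hri' : ri.toNat < matrix.length := by omega
    have hrow : PySem.List.pyGetD matrix ri [] ∈ matrix := by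
      rw [PySem.List.pyGetD_of_nonneg _ _ h0, List.getD_eq_getElem?_getD,
          List.getElem?_eq_getElem hri']
      exact List.getElem_mem hri'
    have hlen : n.toNat ≤ (PySem.List.pyGetD matrix ri []).length := by
      have := hall _ hrow
      omega
    have := inner_loop_eq (PySem.List.pyGetD matrix ri []) n ri acc h0 hlt hlen
    simpa [add_assoc] using this
  rw [PySem.List.foldl_congr_mem _ _ _ _ houter, PySem.List.foldl_add]
  -- rewrite B's two inner maps into prefix sums of the rows
  have hrowlen : ∀ i : Int, 0 ≤ i → i < n →
      n.toNat ≤ (PySem.List.pyGetD matrix i []).length := by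
    intro i h0 hlt
    have hri' : i.toNat < matrix.length := by omega
    have hrow : PySem.List.pyGetD matrix i [] ∈ matrix := by
      rw [PySem.List.pyGetD_of_nonneg _ _ h0, List.getD_eq_getElem?_getD,
          List.getElem?_eq_getElem hri']
      exact List.getElem_mem hri'
    have := hall _ hrow
    omega
  have e1 : (PySem.List.pyRange 0 n 1).map (fun i =>
        ((PySem.List.pyRange 0 n 1).map (fun j =>
          PySem.List.pyGetD (PySem.List.pyGetD matrix i []) j 0)).sum)
      = (PySem.List.pyRange 0 n 1).map (fun i =>
          ((PySem.List.pyGetD matrix i []).take n.toNat).sum) := by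
    apply List.map_congr_left
    intro i hi
    rcases PySem.List.mem_pyRange_one.mp hi with ⟨h0, hlt⟩
    rw [map_pyGetD_range_take _ n (by omega) (hrowlen i h0 hlt)]
  have e2 : (PySem.List.pyRange 0 n 1).map (fun i =>
        ((PySem.List.pyRange 0 (i + 1) 1).map (fun j =>
          PySem.List.pyGetD (PySem.List.pyGetD matrix i []) j 0)).sum)
      = (PySem.List.pyRange 0 n 1).map (fun i =>
          ((PySem.List.pyGetD matrix i []).take (i + 1).toNat).sum) := by
    apply List.map_congr_left
    intro i hi
    rcases PySem.List.mem_pyRange_one.mp hi with ⟨h0, hlt⟩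
    rw [map_pyGetD_range_take _ (i + 1) (by omega) (by have := hrowlen i h0 hlt; omega)]
  rw [e1, e2, PySem.List.sum_map_add_int]
  ring
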